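-- pv_equiv track=rewrite | github.com/jill880829/CDN-population-estimation | Program/ch5/ip_prefix/ip_cluster_16bit_stage1.py | find_prefix
-- ===== SOURCE A (Python) =====
-- def find_prefix(ip):
--     cnt = 0
--     subnet = ""
--     for c in ip:
--         if c == '.':
--             if cnt == 1:
--                 return subnet
--             else:
--                 cnt += 1
--         subnet += c
-- ===== SOURCE B (Python) =====
-- def find_prefix(ip):
--     i = ip.find('.')
--     if i == -1:
--         return None
--     j = ip.find('.', i + 1)
--     if j == -1:
--         return None
--     return ip[:j]
-- ===== Notes on version B (the rewrite author's own statement) =====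
-- stated objective: idiomatic
-- what changed: Replaces A's character-by-character scan that accumulates a growing subnet string with a counter by two str.find calls locating the second dot and one slice ip[:j]; Pre_ excludes inputs with fewer than two dots, where A falls off the loop and returns None instead of a string.
-- outside the precondition, e.g. on find_prefix('192.168'): A returns None, B returns None
import Mathlib
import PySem

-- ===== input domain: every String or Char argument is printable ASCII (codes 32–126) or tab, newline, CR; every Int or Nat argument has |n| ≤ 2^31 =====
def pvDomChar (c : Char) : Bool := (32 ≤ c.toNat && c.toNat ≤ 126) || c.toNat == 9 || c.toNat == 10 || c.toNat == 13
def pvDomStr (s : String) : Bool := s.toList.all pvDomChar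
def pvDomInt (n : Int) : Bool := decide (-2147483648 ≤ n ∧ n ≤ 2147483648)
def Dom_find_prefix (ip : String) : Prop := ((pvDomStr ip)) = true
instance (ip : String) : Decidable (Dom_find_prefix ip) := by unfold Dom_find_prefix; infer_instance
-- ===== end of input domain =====

-- B replaces A's counting character scan with two str.find calls and a slice ip[:j] (idiomatic).
-- A returns None (no String value) when the input has fewer than two dots; Pre_ excludes exactly those inputs.

-- ===== PORT A =====
-- the for-loop over ip's characters, with counter cnt and accumulator subnet
def findPrefixGo : List Char → Int → List Char → String
  | [], _, subnet => String.ofList subnet   -- loop falls through: Python returns None (outside Pre_)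
  | c :: rest, cnt, subnet =>
    if c = '.' then
      if cnt = 1 then String.ofList subnet
      else findPrefixGo rest (cnt + 1) (subnet ++ [c])
    else findPrefixGo rest cnt (subnet ++ [c])

def find_prefix (ip : String) : String := findPrefixGo ip.toList 0 []

-- ===== PORT B =====
def find_prefix_alt (ip : String) : String :=
  let i := PySem.Str.find ip "."
  if i = -1 then ""   -- Python B returns None here (outside Pre_)
  else
    let j := PySem.Str.findFrom ip "." (i + 1) none
    if j = -1 then ""   -- Python B returns None here (outside Pre_)
    else PySem.Str.slice ip none (some j)

-- ===== PRECONDITION & SPEC =====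
-- A returns a string only when ip contains at least two dots; on every other input it falls off
-- the loop and returns None, which is not a value of the declared return type String.
def Pre_find_prefix (ip : String) : Prop := 2 ≤ ip.toList.count '.'
instance (ip : String) : Decidable (Pre_find_prefix ip) := by unfold Pre_find_prefix; infer_instance

def pvWitness_find_prefix : String := "192.168.1.1"

def Spec_find_prefix (ip : String) (out : String) : Prop := out = find_prefix_alt ip
instance (ip : String) (out : String) : Decidable (Spec_find_prefix ip out) := by unfold Spec_find_prefix; infer_instance

-- ===== CLAIM (what is proved, stated in full; the proofs are below) =====
def Claim_equal_find_prefix : Prop := ∀ (ip : String), Dom_find_prefix ip → Pre_find_prefix ip → Spec_find_prefix ip (find_prefix ip)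

-- ===== LEMMAS AND PROOFS =====

-- any string with a dot splits as a dot-free part, the first dot, and a rest
theorem dot_split (l : List Char) (h : '.' ∈ l) :
    ∃ t r, (∀ c ∈ t, c ≠ '.') ∧ l = t ++ '.' :: r := by
  induction l with
  | nil => cases h
  | cons c rest ih =>
    by_cases hc : c = '.'
    · refine ⟨[], rest, by simp, ?_⟩
      rw [hc]; rfl
    · have hm : '.' ∈ rest := by
        cases List.mem_cons.mp h with
        | inl h' => exact absurd h'.symm hc
        | inr h' => exact h'
      obtain ⟨t, r, ht, hr⟩ := ih hm
      refine ⟨c :: t, r, ?_, by rw [hr]; rfl⟩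
      intro x hx
      cases List.mem_cons.mp hx with
      | inl h' => rw [h']; exact hc
      | inr h' => exact ht x h'

-- PySem.Chars.find locates the first dot: the length of the dot-free prefix
theorem find_dot (t r : List Char) (ht : ∀ c ∈ t, c ≠ '.') :
    PySem.Chars.find (t ++ '.' :: r) ['.'] = (t.length : Int) := by
  set l := t ++ '.' :: r with hl
  have hinf : ['.'] <:+: l := (List.singleton_infix_iff '.' l).mpr (by simp [hl])
  have h0 : 0 ≤ PySem.Chars.find l ['.'] := (PySem.Chars.find_nonneg_iff l ['.']).mpr hinf
  obtain ⟨hp, hmin⟩ := PySem.Chars.find_spec (s := l) (sub := ['.']) h0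
  have hat : ['.'] <+: l.drop t.length := by
    rw [hl, List.drop_append]
    simp
  have hle : (PySem.Chars.find l ['.']).toNat ≤ t.length := by
    by_contra hlt
    exact hmin t.length (by omega) hat
  have hge : t.length ≤ (PySem.Chars.find l ['.']).toNat := by
    by_contra hlt
    rw [Nat.not_le] at hlt
    obtain ⟨s, hs⟩ := hp
    have hget : (l.drop (PySem.Chars.find l ['.']).toNat)[0]? = some '.' := by
      rw [← hs]; rfl
    rw [List.getElem?_drop, Nat.add_zero] at hget
    rw [hl, List.getElem?_append_left hlt] at hget
    exact ht '.' (List.mem_of_getElem? hget) rfl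
  omega

-- A's loop with the counter already at 1 stops at the next dot
theorem goA_one (t : List Char) (r acc : List Char) (ht : ∀ c ∈ t, c ≠ '.') :
    findPrefixGo (t ++ '.' :: r) 1 acc = String.ofList (acc ++ t) := by
  induction t generalizing acc with
  | nil => simp [findPrefixGo]
  | cons c t ih =>
    have hc : c ≠ '.' := ht c (by simp)
    simp only [List.cons_append, findPrefixGo, if_neg hc]
    rw [ih (acc ++ [c]) (fun x hx => ht x (by simp [hx]))]
    simp

-- A's loop from counter 0 returns everything up to (excluding) the second dot
theorem goA_zero (t1 t2 r acc : List Char)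
    (h1 : ∀ c ∈ t1, c ≠ '.') (h2 : ∀ c ∈ t2, c ≠ '.') :
    findPrefixGo (t1 ++ '.' :: (t2 ++ '.' :: r)) 0 acc = String.ofList (acc ++ t1 ++ '.' :: t2) := by
  induction t1 generalizing acc with
  | nil =>
    simp only [List.nil_append, findPrefixGo]
    norm_num
    rw [goA_one t2 r (acc ++ ['.']) h2]
    simp
  | cons c t1 ih =>
    have hc : c ≠ '.' := h1 c (by simp)
    simp only [List.cons_append, findPrefixGo, if_neg hc]
    rw [ih (acc ++ [c]) (fun x hx => h1 x (by simp [hx]))]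
    simp

-- ===== VERDICT (by name: the statement is the Claim_ definition above) =====
theorem find_prefix_spec : Claim_equal_find_prefix := by
  intro ip _ hpre
  unfold Spec_find_prefix Pre_find_prefix at *
  set l := ip.toList with hl
  have hmem : '.' ∈ l := List.count_pos_iff.mp (by omega)
  obtain ⟨t1, r, ht1, hr⟩ := dot_split l hmem
  have hcnt : 2 ≤ ('.' :: r).count '.' := by
    have : l.count '.' = t1.count '.' + ('.' :: r).count '.' := by
      rw [hr, List.count_append]
    rw [List.count_eq_zero.mpr (fun h => ht1 _ h rfl)] at this
    omega
  have hmem2 : '.' ∈ r := by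
    have h1 : 0 < r.count '.' := by
      have hc1 : ('.' :: r).count '.' = r.count '.' + 1 := by simp
      omega
    exact List.count_pos_iff.mp h1
  obtain ⟨t2, r2, ht2, hr2⟩ := dot_split r hmem2
  have hldec : l = t1 ++ '.' :: (t2 ++ '.' :: r2) := by rw [hr, hr2]
  -- A's side
  have hA : find_prefix ip = String.ofList (t1 ++ '.' :: t2) := by
    show findPrefixGo ip.toList 0 [] = _
    rw [← hl, hldec, goA_zero t1 t2 r2 [] ht1 ht2]
    simp
  -- B's side
  have hfind : PySem.Str.find ip "." = (t1.length : Int) := by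
    rw [PySem.Str.find_eq, ← hl, hldec]
    exact find_dot t1 _ ht1
  have hk : t1.length + 1 ≤ l.length := by
    rw [hldec]; simp
  have hdrop : l.drop (t1.length + 1) = t2 ++ '.' :: r2 := by
    rw [hldec, List.drop_append]
    simp
  have hfind2 : PySem.Chars.find (l.drop (t1.length + 1)) ['.'] = (t2.length : Int) := by
    rw [hdrop]
    exact find_dot t2 _ ht2
  have hfrom : PySem.Str.findFrom ip "." ((t1.length : Int) + 1) none
      = ((t1.length + 1 + t2.length : Nat) : Int) := by
    rw [PySem.Str.findFrom_eq, ← hl]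
    have hts : (".".toList : List Char) = ['.'] := rfl
    have hc1 : ((t1.length : Int) + 1) = ((t1.length + 1 : Nat) : Int) := by push_cast; ring
    rw [hts, hc1, PySem.Chars.findFrom_natCast l ['.'] (t1.length + 1) hk, hfind2]
    have hne : ((t2.length : Nat) : Int) ≠ -1 := by omega
    rw [if_neg hne]
    push_cast; ring
  have hB : find_prefix_alt ip = PySem.Str.slice ip none (some ((t1.length + 1 + t2.length : Nat) : Int)) := by
    unfold find_prefix_alt
    rw [hfind]
    rw [if_neg (by omega : (t1.length : Int) ≠ -1)]
    rw [hfrom]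
    rw [if_neg (by omega : ((t1.length + 1 + t2.length : Nat) : Int) ≠ -1)]
  have htake : List.take (t1.length + 1 + t2.length) (t1 ++ '.' :: (t2 ++ '.' :: r2))
      = t1 ++ '.' :: t2 := by
    rw [List.take_append, List.take_of_length_le (by omega)]
    congr 1
    have hn : t1.length + 1 + t2.length - t1.length = t2.length + 1 := by omega
    rw [hn, List.take_succ_cons, List.take_append, List.take_of_length_le (by omega)]
    simp
  rw [hA, hB]
  apply String.toList_inj.mp
  rw [PySem.Str.toList_slice, PySem.Chars.slice_eq_listSlice, ← hl,
    PySem.List.slice_to_natCast, hldec, htake]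
  simp
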